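-- pv_equiv track=rewrite | github.com/vrvrakk/VKK_Attention | TRF_test/motor_trf.py | count_nonzero_segments
-- ===== SOURCE A (Python) =====
-- def count_nonzero_segments(array):
--     count = 0
--     in_segment = False
--     for i in range(len(array)):
--         if array[i] != 0 and not in_segment:
--             in_segment = True
--             count += 1
--         elif array[i] == 0 and in_segment:
--             in_segment = False
--     return count
-- ===== SOURCE B (Python) =====
-- def count_nonzero_segments(array):
--     keys = [x != 0 for x in array]
--     runs = [k for i, k in enumerate(keys) if i == 0 or keys[i - 1] != k]
--     return sum(runs)
-- ===== Notes on version B (the rewrite author's own statement) =====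
-- stated objective: idiomatic
-- what changed: Replaces the per-element in_segment state machine with run-length grouping: map each element to a nonzero flag, collapse adjacent equal flags into one run key, and count the True runs.
import Mathlib
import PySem

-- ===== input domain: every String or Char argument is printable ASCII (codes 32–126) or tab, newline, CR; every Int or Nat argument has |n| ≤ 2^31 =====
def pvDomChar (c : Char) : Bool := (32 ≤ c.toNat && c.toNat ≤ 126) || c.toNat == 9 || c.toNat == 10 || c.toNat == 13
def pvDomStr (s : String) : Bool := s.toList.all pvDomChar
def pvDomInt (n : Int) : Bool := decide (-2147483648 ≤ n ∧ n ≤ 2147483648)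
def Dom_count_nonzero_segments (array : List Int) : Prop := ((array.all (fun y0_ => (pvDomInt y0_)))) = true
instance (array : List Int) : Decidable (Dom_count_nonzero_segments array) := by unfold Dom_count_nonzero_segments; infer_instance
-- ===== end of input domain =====

-- B replaces A's per-element in_segment state machine with run grouping (collapse
-- adjacent equal nonzero-flags, count True runs); same cost, more declarative.

-- ===== PORT A =====
-- A's loop over the array, carrying (count, in_segment)
def count_nonzero_segments (array : List Int) : Int :=
  (array.foldl
    (fun (st : Int × Bool) x =>
      if x ≠ 0 ∧ ¬ st.2 then (st.1 + 1, true)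
      else if x = 0 ∧ st.2 then (st.1, false)
      else st)
    (0, false)).1

-- ===== PORT B =====
-- the comprehension 'keep k when i == 0 or keys[i-1] != k', with prev = keys[i-1] (none at i = 0)
def pvCollapse (prev : Option Bool) : List Bool → List Bool
  | [] => []
  | k :: t => if prev = some k then pvCollapse (some k) t else k :: pvCollapse (some k) t

-- sum of a list of booleans (Python's sum over bools)
def pvSumB : List Bool → Int
  | [] => 0
  | b :: t => (if b then 1 else 0) + pvSumB t

def count_nonzero_segments_alt (array : List Int) : Int :=
  pvSumB (pvCollapse none (array.map (fun x => decide (x ≠ 0))))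

-- ===== PRECONDITION & SPEC =====
def Spec_count_nonzero_segments (array : List Int) (out : Int) : Prop := out = count_nonzero_segments_alt array
instance (array : List Int) (out : Int) : Decidable (Spec_count_nonzero_segments array out) := by unfold Spec_count_nonzero_segments; infer_instance

-- ===== CLAIM (what is proved, stated in full; the proofs are below) =====
def Claim_equal_count_nonzero_segments : Prop := ∀ (array : List Int), Dom_count_nonzero_segments array → Spec_count_nonzero_segments array (count_nonzero_segments array)

-- ===== LEMMAS AND PROOFS =====

-- A's fold from state (c, b) counts exactly the True runs of the remaining flags,
-- seen after a previous flag b.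
theorem pvFold_eq (l : List Int) : ∀ (c : Int) (b : Bool),
    (l.foldl
      (fun (st : Int × Bool) x =>
        if x ≠ 0 ∧ ¬ st.2 then (st.1 + 1, true)
        else if x = 0 ∧ st.2 then (st.1, false)
        else st)
      (c, b)).1
    = c + pvSumB (pvCollapse (some b) (l.map (fun x => decide (x ≠ 0)))) := by
  induction l with
  | nil => intro c b; simp [pvCollapse, pvSumB]
  | cons x t ih =>
    intro c b
    rw [List.foldl_cons]
    by_cases hx : x = 0 <;> cases b
    · have h : (if x ≠ 0 ∧ ¬(false : Bool) then (c + 1, true)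
          else if x = 0 ∧ (false : Bool) then (c, false) else ((c, false) : Int × Bool))
          = (c, false) := by simp [hx]
      rw [h, ih]; simp [hx, pvCollapse]
    · have h : (if x ≠ 0 ∧ ¬(true : Bool) then (c + 1, true)
          else if x = 0 ∧ (true : Bool) then (c, false) else ((c, true) : Int × Bool))
          = (c, false) := by simp [hx]
      rw [h, ih]; simp [hx, pvCollapse, pvSumB]; try ring
    · have h : (if x ≠ 0 ∧ ¬(false : Bool) then (c + 1, true)
          else if x = 0 ∧ (false : Bool) then (c, false) else ((c, false) : Int × Bool))
          = (c + 1, true) := by simp [hx]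
      rw [h, ih]; simp [hx, pvCollapse, pvSumB]; try ring
    · have h : (if x ≠ 0 ∧ ¬(true : Bool) then (c + 1, true)
          else if x = 0 ∧ (true : Bool) then (c, false) else ((c, true) : Int × Bool))
          = (c, true) := by simp [hx]
      rw [h, ih]; simp [hx, pvCollapse]

-- a leading previous flag 'false' does not change the count of True runs
theorem pvCollapse_false (l : List Bool) :
    pvSumB (pvCollapse (some false) l) = pvSumB (pvCollapse none l) := by
  cases l with
  | nil => rfl
  | cons k t => cases k <;> simp [pvCollapse, pvSumB]

-- ===== VERDICT (by name: the statement is the Claim_ definition above) =====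
theorem count_nonzero_segments_spec : Claim_equal_count_nonzero_segments := by
  intro array _
  unfold Spec_count_nonzero_segments count_nonzero_segments count_nonzero_segments_alt
  rw [pvFold_eq, pvCollapse_false]
  ring
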